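-- pv_equiv track=rewrite | github.com/Magic07/online-judge-solutions | leetcode/1758-distribute-repeating-integers.py | canDistribute
-- ===== SOURCE A (Python) =====
-- from typing import List
--
-- def canDistribute(nums: List[int], quantity: List[int]) -> bool:
--     numbersMap={}
--     for x in nums:
--         if x not in numbersMap:
--             numbersMap[x]=0
--         numbersMap[x]+=1
--     index=0
--     numbers=[0]*len(numbersMap)
--     for k,v in numbersMap.items():
--         numbers[index]=v
--         index+=1
--     numbers=sorted(numbers, reverse=True)
--     quantity=sorted(quantity, reverse=True)
--     valid_numbers=0
--     while valid_numbers<len(numbers) and numbers[valid_numbers]!=0: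
--         valid_numbers+=1
--     def distribute(start):
--         if start>=len(quantity):
--             return True
--         for j in range(valid_numbers):
--             if numbers[j]>=quantity[start]:
--                 numbers[j]-=quantity[start]
--                 if distribute(start+1):
--                     return True
--                 numbers[j]+=quantity[start]
--         return False
--     return distribute(0)
-- ===== SOURCE B (Python) =====
-- from typing import List
--
-- def canDistribute(nums: List[int], quantity: List[int]) -> bool:
--     # Maintain a multiset (value -> multiplicity) of remaining capacities instead of a
--     # positional array: equal capacities are tried once, not once per position.
--     tally = {}
--     for x in nums:
--         tally[x] = tally.get(x, 0) + 1
--     avail = {}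
--     for c in tally.values():
--         avail[c] = avail.get(c, 0) + 1
--     qs = sorted(quantity, reverse=True)
--
--     def serve(avail, rest):
--         if not rest:
--             return True
--         q = rest[0]
--         for v, cnt in avail.items():
--             if cnt > 0 and v >= q:
--                 nxt = dict(avail)
--                 nxt[v] = cnt - 1
--                 nxt[v - q] = nxt.get(v - q, 0) + 1
--                 if serve(nxt, rest[1:]):
--                     return True
--         return False
--
--     return serve(avail, qs)
-- ===== Notes on version B (the rewrite author's own statement) =====
-- stated objective: alternative
-- what changed: B backtracks over a multiset of remaining counts (count value -> multiplicity) instead of A's positional array of sorted counts, branching once per distinct remaining count value rather than once per array slot, and drops A's sorted-counts/valid_numbers machinery.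
import Mathlib
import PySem

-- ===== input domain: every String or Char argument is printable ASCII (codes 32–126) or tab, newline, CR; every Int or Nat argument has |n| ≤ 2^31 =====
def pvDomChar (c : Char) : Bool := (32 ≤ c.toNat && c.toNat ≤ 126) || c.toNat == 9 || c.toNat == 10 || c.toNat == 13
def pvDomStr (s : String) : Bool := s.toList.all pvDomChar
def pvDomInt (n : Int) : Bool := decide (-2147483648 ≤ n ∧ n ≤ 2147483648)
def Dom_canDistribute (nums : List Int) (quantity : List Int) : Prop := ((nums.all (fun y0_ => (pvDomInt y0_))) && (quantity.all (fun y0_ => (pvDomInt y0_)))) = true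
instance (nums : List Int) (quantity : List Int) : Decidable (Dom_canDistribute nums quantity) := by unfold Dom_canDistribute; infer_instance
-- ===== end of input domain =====

-- B replaces A's positional array of remaining counts by a multiset of counts (count value ->
-- multiplicity), so the backtracking branches once per distinct remaining count value instead of
-- once per array position (objective: alternative; both mutate only local data).

-- ===== PORT A =====
-- 'for k,v in numbersMap.items(): numbers[index]=v; index+=1'  (index is always in range, so
-- List.set is exact for the Python element assignment)
def pvBuildNumbers : List (Int × Int) → List Int → Nat → List Int
  | [], numbers, _ => numbers
  | (_, v) :: rest, numbers, index => pvBuildNumbers rest (numbers.set index v) (index + 1)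

-- 'while valid_numbers<len(numbers) and numbers[valid_numbers]!=0: valid_numbers+=1'
-- (the read numbers[valid_numbers] is guarded by valid_numbers<len(numbers), so List.getD is exact)
def pvValidNumbers (numbers : List Int) (vn : Nat) : Nat :=
  if vn < numbers.length ∧ numbers.getD vn 0 ≠ 0 then pvValidNumbers numbers (vn + 1) else vn
termination_by numbers.length - vn
decreasing_by omega

-- 'def distribute(start)': the in-place 'numbers[j]-=q … numbers[j]+=q' backtracking is the pure
-- recursion on numbers.set (the restore returns to exactly the caller's list); all indices j and
-- start are in range at every read, so List.getD is exact
def pvDistribute (qs : List Int) (vn : Nat) (numbers : List Int) (start : Nat) : Bool :=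
  if h : start ≥ qs.length then true
  else
    (List.range vn).any fun j =>
      if numbers.getD j 0 ≥ qs.getD start 0 then
        pvDistribute qs vn (numbers.set j (numbers.getD j 0 - qs.getD start 0)) (start + 1)
      else false
termination_by qs.length - start
decreasing_by omega

def canDistribute (nums : List Int) (quantity : List Int) : Bool :=
  let numbersMap := nums.foldl (fun d x =>
      let d' := if d.contains x then d else d.insert x 0   -- if x not in numbersMap: numbersMap[x]=0
      d'.insert x (d'.getD x 0 + 1)) PySem.Dict.empty      -- numbersMap[x]+=1
  let numbers0 := List.replicate numbersMap.size 0         -- [0]*len(numbersMap)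
  let numbers1 := pvBuildNumbers numbersMap.items numbers0 0
  let numbers := PySem.List.sorted numbers1 (fun x => x) true
  let qs := PySem.List.sorted quantity (fun x => x) true
  let vn := pvValidNumbers numbers 0
  pvDistribute qs vn numbers 0

-- ===== PORT B =====
def pvServe (avail : PySem.Dict Int Int) (rest : List Int) : Bool :=
  match rest with
  | [] => true
  | q :: rs =>
    avail.items.any fun p =>
      if 0 < p.2 ∧ q ≤ p.1 then
        let nxt := avail.insert p.1 (p.2 - 1)
        let nxt := nxt.insert (p.1 - q) (nxt.getD (p.1 - q) 0 + 1)
        pvServe nxt rs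
      else false

def canDistribute_alt (nums : List Int) (quantity : List Int) : Bool :=
  let tally := nums.foldl (fun d x => d.insert x (d.getD x 0 + 1)) PySem.Dict.empty
  let avail := tally.values.foldl (fun d c => d.insert c (d.getD c 0 + 1)) PySem.Dict.empty
  let qs := PySem.List.sorted quantity (fun x => x) true
  pvServe avail qs

-- ===== PRECONDITION & SPEC =====
def Spec_canDistribute (nums : List Int) (quantity : List Int) (out : Bool) : Prop := out = canDistribute_alt nums quantity
instance (nums : List Int) (quantity : List Int) (out : Bool) : Decidable (Spec_canDistribute nums quantity out) := by unfold Spec_canDistribute; infer_instance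

-- ===== CLAIM (what is proved, stated in full; the proofs are below) =====
def Claim_equal_canDistribute : Prop := ∀ (nums : List Int) (quantity : List Int), Dom_canDistribute nums quantity → Spec_canDistribute nums quantity (canDistribute nums quantity)

-- ===== LEMMAS AND PROOFS =====

-- The common semantics both searches decide: the multiset s of remaining capacities can serve the
-- quantity list, one quantity at a time
def pvG (s : Multiset Int) : List Int → Prop
  | [] => True
  | q :: qs => ∃ v ∈ s, q ≤ v ∧ pvG ((v - q) ::ₘ s.erase v) qs

theorem pvBuildNumbers_eq (l : List (Int × Int)) : ∀ (arr : List Int) (i : Nat),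
    arr.length = i + l.length → pvBuildNumbers l arr i = arr.take i ++ l.map (·.2) := by
  induction l with
  | nil => intro arr i h; simp at h; simp [pvBuildNumbers, List.take_of_length_le (le_of_eq h)]
  | cons p rest ih =>
    intro arr i h
    obtain ⟨k, v⟩ := p
    simp only [List.length_cons] at h
    have hi : i < arr.length := by omega
    show pvBuildNumbers rest (arr.set i v) (i+1) = arr.take i ++ (v :: rest.map (·.2))
    rw [ih (arr.set i v) (i+1) (by simp; omega)]
    rw [List.set_eq_take_cons_drop v hi]
    have ht : (arr.take i ++ v :: arr.drop (i+1)).take (i+1) = arr.take i ++ [v] := by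
      rw [List.take_append]
      simp [List.length_take, Nat.min_eq_left (le_of_lt hi), List.take_take]
    rw [ht]
    simp

theorem pvValidNumbers_eq (numbers : List Int) (h : ∀ x ∈ numbers, x ≠ 0) :
    ∀ i, i ≤ numbers.length → pvValidNumbers numbers i = numbers.length := by
  intro i hle
  induction hn : numbers.length - i generalizing i with
  | zero =>
    rw [pvValidNumbers]
    have : ¬ (i < numbers.length ∧ numbers.getD i 0 ≠ 0) := by omega
    rw [if_neg this]; omega
  | succ n ih =>
    rw [pvValidNumbers]
    have hi : i < numbers.length := by omega
    have : numbers.getD i 0 = numbers[i] := List.getD_eq_getElem _ _ hi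
    rw [if_pos ⟨hi, by rw [this]; exact h _ (List.getElem_mem hi)⟩]
    exact ih (i+1) (by omega) (by omega)

theorem listSet_perm (ns : List Int) (j : Nat) (x : Int) (h : j < ns.length) :
    (ns.set j x : Multiset Int) = x ::ₘ (ns : Multiset Int).erase ns[j] := by
  have h1 : ns.set j x = ns.take j ++ x :: ns.drop (j+1) := List.set_eq_take_cons_drop x h
  have h2 : ns = ns.take j ++ ns[j] :: ns.drop (j+1) := by
    conv_lhs => rw [← List.take_append_drop j ns, List.drop_eq_getElem_cons h]
  have hperm : List.Perm ns (ns[j] :: (ns.take j ++ ns.drop (j+1))) := by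
    conv_lhs => rw [h2]
    exact List.perm_middle
  have h3 : (ns : Multiset Int) = ns[j] ::ₘ ((ns.take j ++ ns.drop (j+1) : List Int) : Multiset Int) := by
    exact_mod_cast Multiset.coe_eq_coe.mpr hperm
  rw [h3, Multiset.erase_cons_head]
  have hperm2 : List.Perm (ns.set j x) (x :: (ns.take j ++ ns.drop (j+1))) := by
    rw [h1]; exact List.perm_middle
  exact_mod_cast Multiset.coe_eq_coe.mpr hperm2

theorem pvDistribute_iff (qs : List Int) : ∀ (start : Nat) (ns : List Int),
    pvDistribute qs ns.length ns start = true ↔ pvG (ns : Multiset Int) (qs.drop start) := by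
  suffices H : ∀ n start (ns : List Int), qs.length - start = n →
      (pvDistribute qs ns.length ns start = true ↔ pvG (ns : Multiset Int) (qs.drop start)) by
    intro start ns; exact H _ start ns rfl
  intro n
  induction n with
  | zero =>
    intro start ns h
    rw [pvDistribute, dif_pos (by omega), List.drop_of_length_le (by omega)]
    simp [pvG]
  | succ n ih =>
    intro start ns h
    have hlt : start < qs.length := by omega
    rw [pvDistribute, dif_neg (by omega), List.drop_eq_getElem_cons hlt]
    rw [List.any_eq_true]
    have hq : qs.getD start 0 = qs[start] := List.getD_eq_getElem _ _ hlt
    show _ ↔ pvG _ (qs[start] :: qs.drop (start+1))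
    simp only [pvG]
    constructor
    · rintro ⟨j, hj, hcond⟩
      rw [List.mem_range] at hj
      split at hcond
      case isTrue hge =>
        have hnj : ns.getD j 0 = ns[j] := List.getD_eq_getElem _ _ hj
        rw [hnj, hq] at hge hcond
        have hlen : (ns.set j (ns[j] - qs[start])).length = ns.length := List.length_set ..
        rw [← hlen] at hcond
        have hG := (ih (start+1) (ns.set j (ns[j] - qs[start])) (by omega)).mp hcond
        rw [listSet_perm ns j _ hj] at hG
        exact ⟨ns[j], Multiset.mem_coe.mpr (List.getElem_mem hj), hge, hG⟩
      case isFalse => exact absurd hcond (by simp)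
    · rintro ⟨v, hv, hge, hG⟩
      obtain ⟨j, hj, rfl⟩ := List.getElem_of_mem (Multiset.mem_coe.mp hv)
      refine ⟨j, List.mem_range.mpr hj, ?_⟩
      have hnj : ns.getD j 0 = ns[j] := List.getD_eq_getElem _ _ hj
      rw [hnj, hq, if_pos hge]
      have hlen : (ns.set j (ns[j] - qs[start])).length = ns.length := List.length_set ..
      rw [← hlen]
      apply (ih (start+1) (ns.set j (ns[j] - qs[start])) (by omega)).mpr
      rw [listSet_perm ns j _ hj]
      exact hG

-- the multiset represented by a counter dict (value -> multiplicity)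
def pvMs (d : PySem.Dict Int Int) : Multiset Int :=
  (d.items.map (fun p => Multiset.replicate p.2.toNat p.1)).sum

theorem count_sumRep_notmem (l : List (Int × Int)) (x : Int) (hx : x ∉ l.map Prod.fst) :
    ((l.map (fun p => Multiset.replicate p.2.toNat p.1)).sum).count x = 0 := by
  induction l with
  | nil => simp
  | cons p rest ih =>
    simp only [List.map_cons, List.sum_cons, Multiset.count_add]
    simp only [List.map_cons, List.mem_cons, not_or] at hx
    rw [Multiset.count_replicate, if_neg (fun hh => hx.1 hh.symm), ih hx.2]

theorem count_sumRep (l : List (Int × Int)) (hnd : (l.map Prod.fst).Nodup) (x : Int) :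
    ((l.map (fun p => Multiset.replicate p.2.toNat p.1)).sum).count x
      = ((PySem.Dict.mk l).getD x 0).toNat := by
  induction l with
  | nil => simp [PySem.Dict.getD_eq_get?_getD]; rfl
  | cons p rest ih =>
    obtain ⟨k, v⟩ := p
    simp only [List.map_cons, List.sum_cons, Multiset.count_add]
    rw [PySem.Dict.getD_eq_get?_getD, PySem.Dict.get?_mk_cons]
    simp only [List.map_cons, List.nodup_cons] at hnd
    by_cases hk : k = x
    · subst hk
      rw [Multiset.count_replicate, if_pos rfl, count_sumRep_notmem rest k hnd.1]
      simp
    · rw [Multiset.count_replicate, if_neg hk]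
      have : (k == x) = false := by simp [hk]
      rw [this]
      simpa [PySem.Dict.getD_eq_get?_getD] using ih hnd.2

theorem count_pvMs (d : PySem.Dict Int Int) (hnd : d.keys.Nodup) (x : Int) :
    (pvMs d).count x = (d.getD x 0).toNat := count_sumRep d.items hnd x

theorem pvGetD_nonneg (d : PySem.Dict Int Int) (hpos : ∀ p ∈ d.items, 0 ≤ p.2) (x : Int) :
    0 ≤ d.getD x 0 := by
  rw [PySem.Dict.getD_eq_get?_getD]
  cases hg : d.get? x with
  | none => simp
  | some w => simpa using hpos _ (PySem.Dict.mem_items_of_get?_eq_some d hg)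

theorem pvServe_iff : ∀ (qs : List Int) (d : PySem.Dict Int Int), d.keys.Nodup →
    (∀ p ∈ d.items, 0 ≤ p.2) → (pvServe d qs = true ↔ pvG (pvMs d) qs) := by
  intro qs
  induction qs with
  | nil => intro d _ _; simp [pvServe, pvG]
  | cons q rs ih =>
    intro d hnd hpos
    show d.items.any _ = true ↔ _
    rw [List.any_eq_true]
    simp only [pvG]
    -- invariants and the multiset evolution of the successor dict, for (v, c) ∈ d.items, 0 < c
    have key : ∀ v c, (v, c) ∈ d.items → 0 < c →
        ((d.insert v (c-1)).insert (v - q) (((d.insert v (c-1)).getD (v-q) 0) + 1)).keys.Nodup ∧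
        (∀ p ∈ ((d.insert v (c-1)).insert (v - q) (((d.insert v (c-1)).getD (v-q) 0) + 1)).items, 0 ≤ p.2) ∧
        pvMs ((d.insert v (c-1)).insert (v - q) (((d.insert v (c-1)).getD (v-q) 0) + 1)) = (v - q) ::ₘ (pvMs d).erase v := by
      intro v c hp hc
      set d1 := d.insert v (c-1) with hd1
      set w := d1.getD (v-q) 0 with hw
      have hnd1 : d1.keys.Nodup := PySem.Dict.nodup_keys_insert d v (c-1) hnd
      have hpos1 : ∀ p ∈ d1.items, 0 ≤ p.2 := by
        intro p hmem
        rcases (PySem.Dict.mem_items_insert d v (c-1) p).mp hmem with h | h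
        · subst h; simpa using by omega
        · exact hpos _ h.1
      have hnd2 : (d1.insert (v-q) (w+1)).keys.Nodup := PySem.Dict.nodup_keys_insert d1 _ _ hnd1
      have hw0 : 0 ≤ w := pvGetD_nonneg d1 hpos1 _
      have hpos2 : ∀ p ∈ (d1.insert (v-q) (w+1)).items, 0 ≤ p.2 := by
        intro p hmem
        rcases (PySem.Dict.mem_items_insert d1 (v-q) (w+1) p).mp hmem with h | h
        · subst h; simpa using by omega
        · exact hpos1 _ h.1
      refine ⟨hnd2, hpos2, ?_⟩
      have hdv : d.getD v 0 = c := PySem.Dict.getD_of_mem_items d hp hnd 0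
      ext x
      rw [count_pvMs _ hnd2 x, PySem.Dict.getD_insert, Multiset.count_cons]
      by_cases hx2 : x = v
      · subst hx2
        rw [Multiset.count_erase_self, count_pvMs d hnd x, hdv]
        by_cases hq0 : q = 0
        · rw [if_pos (by omega : x = x - q)]
          have hwv : w = c - 1 := by
            rw [hw, hd1]
            have hxq : x - q = x := by omega
            rw [hxq, PySem.Dict.getD_insert, if_pos rfl]
          rw [hwv, if_pos (by omega : x = x - q)]
          omega
        · rw [if_neg (by omega : ¬ x = x - q), hd1, PySem.Dict.getD_insert, if_pos rfl,
              if_neg (by omega : ¬ x = x - q)]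
          omega
      · rw [Multiset.count_erase_of_ne hx2, count_pvMs d hnd x]
        by_cases hx1 : x = v - q
        · subst hx1
          rw [if_pos rfl]
          have hwx : w = d.getD (v - q) 0 := by
            rw [hw, hd1, PySem.Dict.getD_insert, if_neg hx2]
          have hdx : 0 ≤ d.getD (v - q) 0 := pvGetD_nonneg d hpos _
          rw [hwx, if_pos rfl]
          omega
        · rw [if_neg hx1, hd1, PySem.Dict.getD_insert, if_neg hx2, if_neg hx1]
          omega
    constructor
    · rintro ⟨p, hp, hcond⟩
      by_cases hc : 0 < p.2 ∧ q ≤ p.1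
      · rw [if_pos hc] at hcond
        obtain ⟨knd, kpos, kms⟩ := key p.1 p.2 hp hc.1
        have hdv : d.getD p.1 0 = p.2 := PySem.Dict.getD_of_mem_items d hp hnd 0
        refine ⟨p.1, ?_, hc.2, ?_⟩
        · rw [← Multiset.count_pos, count_pvMs d hnd, hdv]; omega
        · rw [← kms]
          exact (ih _ knd kpos).mp hcond
      · rw [if_neg hc] at hcond; exact absurd hcond (by simp)
    · rintro ⟨v, hv, hq, hG⟩
      have hpos' : 0 < (d.getD v 0).toNat := by
        rw [← count_pvMs d hnd, Multiset.count_pos]; exact hv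
      have hc : 0 < d.getD v 0 := by omega
      obtain ⟨c, hgc⟩ : ∃ c, d.get? v = some c := by
        rw [PySem.Dict.getD_eq_get?_getD] at hc
        cases hg : d.get? v with
        | none => rw [hg] at hc; simp at hc
        | some w => exact ⟨w, rfl⟩
      have hceq : d.getD v 0 = c := by rw [PySem.Dict.getD_eq_get?_getD, hgc]; rfl
      have hp : (v, c) ∈ d.items := PySem.Dict.mem_items_of_get?_eq_some d hgc
      have hc' : 0 < c := hceq ▸ hc
      obtain ⟨knd, kpos, kms⟩ := key v c hp hc'
      refine ⟨(v, c), hp, ?_⟩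
      rw [if_pos ⟨hc', hq⟩]
      exact (ih _ knd kpos).mpr (kms ▸ hG)

-- A's first loop builds exactly the get-based counter B builds
theorem pvAStep_eq : (fun (d : PySem.Dict Int Int) (x : Int) =>
    (if d.contains x then d else d.insert x 0).insert x
      ((if d.contains x then d else d.insert x 0).getD x 0 + 1))
    = fun (d : PySem.Dict Int Int) (x : Int) => d.insert x (d.getD x 0 + 1) := by
  funext d x
  by_cases h : d.contains x
  · rw [if_pos h]
  · rw [if_neg h, PySem.Dict.getD_insert_self, PySem.Dict.insert_insert_self,
        PySem.Dict.getD_of_not_contains d 0 (by simpa using h)]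

theorem pvCounterValues_ne_zero (nums : List Int) (x : Int)
    (h : x ∈ (PySem.Dict.counter nums : PySem.Dict Int Int).values) : x ≠ 0 := by
  rw [show (PySem.Dict.counter nums : PySem.Dict Int Int).values
        = (PySem.Dict.counter nums : PySem.Dict Int Int).items.map (·.2) from rfl,
      PySem.Dict.items_counter] at h
  simp only [List.map_map, List.mem_map] at h
  obtain ⟨k, hk, rfl⟩ := h
  have hkn : k ∈ nums := (PySem.Set.mem_ofList _ _).mp hk
  have := List.count_pos_iff.mpr hkn
  simp
  omega

theorem pvCounter_items_nonneg (l : List Int) :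
    ∀ p ∈ (PySem.Dict.counter l : PySem.Dict Int Int).items, 0 ≤ p.2 := by
  intro p hp
  rw [PySem.Dict.items_counter] at hp
  simp only [List.mem_map] at hp
  obtain ⟨k, _, rfl⟩ := hp
  simp

-- ===== VERDICT (by name: the statement is the Claim_ definition above) =====
theorem canDistribute_spec : Claim_equal_canDistribute := by
  intro nums quantity _
  show canDistribute nums quantity = canDistribute_alt nums quantity
  simp only [canDistribute, canDistribute_alt]
  rw [pvAStep_eq, PySem.Dict.foldl_insert_getD_add_one_eq_counter nums]
  set cnt := (PySem.Dict.counter nums : PySem.Dict Int Int) with hcnt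
  set vals := cnt.values with hvals
  rw [PySem.Dict.foldl_insert_getD_add_one_eq_counter vals]
  have hbuild : pvBuildNumbers cnt.items (List.replicate cnt.size 0) 0 = vals := by
    rw [pvBuildNumbers_eq cnt.items (List.replicate cnt.size 0) 0 (by simp [List.length_replicate]; rfl)]
    simp [hvals]
    rfl
  rw [hbuild]
  set numbers := PySem.List.sorted vals (fun x => x) true with hnumbers
  set qs := PySem.List.sorted quantity (fun x => x) true with hqs
  have hperm : List.Perm numbers vals := PySem.List.sorted_perm vals (fun x => x) true
  have hne : ∀ x ∈ numbers, x ≠ 0 := by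
    intro x hx
    exact pvCounterValues_ne_zero nums x (hperm.mem_iff.mp hx)
  rw [pvValidNumbers_eq numbers hne 0 (by omega)]
  have hA := pvDistribute_iff qs 0 numbers
  rw [List.drop_zero] at hA
  have hB := pvServe_iff qs (PySem.Dict.counter vals) (PySem.Dict.nodup_keys_counter vals)
      (pvCounter_items_nonneg vals)
  have hms : pvMs (PySem.Dict.counter vals) = (vals : Multiset Int) := by
    ext x
    rw [count_pvMs _ (PySem.Dict.nodup_keys_counter vals) x, PySem.Dict.getD_counter]
    simp
  have hcoe : (numbers : Multiset Int) = (vals : Multiset Int) := Multiset.coe_eq_coe.mpr hperm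
  rw [hms] at hB
  rw [hcoe] at hA
  exact Bool.eq_iff_iff.mpr (hA.trans hB.symm)
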